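-- pv_equiv track=rewrite | github.com/pradhyu/pk-learns-to-lLLM | drools_graph_rag/parser/parser.py | _split_constraints
-- ===== SOURCE A (Python) =====
-- from typing import Dict, List, Optional, Tuple, Union
--
-- def _split_constraints(constraints_str: str) -> List[str]:
--     """
--     Split constraints by && operator, handling nested parentheses.
--
--     Args:
--         constraints_str: The constraints string.
--
--     Returns:
--         A list of constraint strings.
--     """
--     result = []
--     current = ""
--     paren_level = 0
--
--     for char in constraints_str:
--         if char == '(':
--             paren_level += 1
--             current += char
--         elif char == ')':
--             paren_level -= 1
--             current += char
--         elif char == '&' and paren_level == 0: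
--             # Skip && operator
--             if current.strip():
--                 result.append(current.strip())
--             current = ""
--         else:
--             current += char
--
--     if current.strip():
--         result.append(current.strip())
--
--     return result
-- ===== SOURCE B (Python) =====
-- def _split_constraints(constraints_str):
--     """Iteratively peel off the segment before the next top-level ampersand instead of
--     accumulating characters one by one."""
--     result = []
--     s = constraints_str
--     while True:
--         depth = 0
--         cut = -1
--         for i, ch in enumerate(s):
--             if ch == '(':
--                 depth += 1
--             elif ch == ')':
--                 depth -= 1
--             elif ch == '&' and depth == 0:
--                 cut = i
--                 break
--         if cut < 0:
--             break
--         head = s[:cut].strip()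
--         if head:
--             result.append(head)
--         s = s[cut + 1:]
--     t = s.strip()
--     if t:
--         result.append(t)
--     return result
-- ===== Notes on version B (the rewrite author's own statement) =====
-- stated objective: alternative
-- what changed: Replaces A's char-by-char accumulator loop with a peel loop that finds the index of the next top-level ampersand, slices off and strips the head, and continues on the remainder.
import Mathlib
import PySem

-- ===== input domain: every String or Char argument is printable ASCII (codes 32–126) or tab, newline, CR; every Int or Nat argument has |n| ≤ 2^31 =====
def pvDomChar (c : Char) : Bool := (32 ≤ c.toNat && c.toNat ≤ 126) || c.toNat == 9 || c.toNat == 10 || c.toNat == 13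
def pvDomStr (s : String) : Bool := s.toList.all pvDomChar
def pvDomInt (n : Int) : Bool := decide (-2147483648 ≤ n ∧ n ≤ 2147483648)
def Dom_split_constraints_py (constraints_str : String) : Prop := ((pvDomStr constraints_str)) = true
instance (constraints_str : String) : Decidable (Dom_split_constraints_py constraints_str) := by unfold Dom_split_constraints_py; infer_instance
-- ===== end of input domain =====

-- B peels segments at top-level '&' indices instead of A's char-by-char accumulator; return value only, no mutation.

-- ===== PORT A =====
-- one step of A's for-loop over the characters; state = (result, current, paren_level)
def pvStepA (st : List String × String × Int) (c : Char) : List String × String × Int :=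
  let (result, current, paren) := st
  if c = '(' then (result, current.push c, paren + 1)
  else if c = ')' then (result, current.push c, paren - 1)
  else if c = '&' ∧ paren = 0 then
    (if PySem.Str.strip current ≠ "" then result ++ [PySem.Str.strip current] else result, "", paren)
  else (result, current.push c, paren)

-- A's trailing 'if current.strip(): result.append(...)'
def pvFinishA (st : List String × String × Int) : List String :=
  if PySem.Str.strip st.2.1 ≠ "" then st.1 ++ [PySem.Str.strip st.2.1] else st.1

def split_constraints_py (constraints_str : String) : List String :=
  pvFinishA (constraints_str.toList.foldl pvStepA ([], "", 0))

-- ===== PORT B =====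
-- B's inner for-loop: index of the first '&' at paren depth 0, if any (cut = -1 → none)
def pvFindAmp (d : Int) : List Char → Option Nat
  | [] => none
  | c :: cs =>
    if c = '(' then (pvFindAmp (d + 1) cs).map (· + 1)
    else if c = ')' then (pvFindAmp (d - 1) cs).map (· + 1)
    else if c = '&' ∧ d = 0 then some 0
    else (pvFindAmp d cs).map (· + 1)

theorem pvFindAmp_lt (d : Int) (cs : List Char) (i : Nat) (h : pvFindAmp d cs = some i) :
    i < cs.length := by
  induction cs generalizing d i with
  | nil => simp [pvFindAmp] at h
  | cons c cs ih =>
    simp only [pvFindAmp] at h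
    split_ifs at h <;>
      first
        | (simp only [Option.map_eq_some_iff] at h
           obtain ⟨j, hj, rfl⟩ := h; have := ih _ _ hj; simp; omega)
        | (cases h; simp)

-- B's while-loop, tail recursion on the remaining string (as chars), accumulator = result
def pvPeel (acc : List String) (cs : List Char) : List String :=
  match h : pvFindAmp 0 cs with
  | none =>
      if PySem.Chars.strip cs ≠ [] then acc ++ [String.ofList (PySem.Chars.strip cs)] else acc
  | some i =>
      pvPeel
        (if PySem.Chars.strip (cs.take i) ≠ [] then
          acc ++ [String.ofList (PySem.Chars.strip (cs.take i))] else acc)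
        (cs.drop (i + 1))
termination_by cs.length
decreasing_by
  have := pvFindAmp_lt 0 cs i h
  simp [List.length_drop]; omega

def split_constraints_py_alt (constraints_str : String) : List String :=
  pvPeel [] constraints_str.toList

-- ===== PRECONDITION & SPEC =====
def Spec_split_constraints_py (constraints_str : String) (out : List String) : Prop := out = split_constraints_py_alt constraints_str
instance (constraints_str : String) (out : List String) : Decidable (Spec_split_constraints_py constraints_str out) := by unfold Spec_split_constraints_py; infer_instance

-- ===== CLAIM (what is proved, stated in full; the proofs are below) =====
def Claim_equal_split_constraints_py : Prop := ∀ (constraints_str : String), Dom_split_constraints_py constraints_str → Spec_split_constraints_py constraints_str (split_constraints_py constraints_str)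

-- ===== LEMMAS AND PROOFS =====

def pvStripNE (l : List Char) : List String :=
  if PySem.Chars.strip l ≠ [] then [String.ofList (PySem.Chars.strip l)] else []

-- common characterisation of both programs (cur = A's current, d = paren depth)
def pvCore (cs : List Char) (cur : List Char) (d : Int) : List String :=
  match cs with
  | [] => pvStripNE cur
  | c :: cs' =>
    if c = '(' then pvCore cs' (cur ++ [c]) (d + 1)
    else if c = ')' then pvCore cs' (cur ++ [c]) (d - 1)
    else if c = '&' ∧ d = 0 then pvStripNE cur ++ pvCore cs' [] 0
    else pvCore cs' (cur ++ [c]) d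

theorem strip_str (s : String) :
    (if PySem.Str.strip s ≠ "" then [PySem.Str.strip s] else []) = pvStripNE s.toList := by
  have h : PySem.Str.strip s = String.ofList (PySem.Chars.strip s.toList) := by
    apply String.toList_inj.mp; simp
  rw [pvStripNE, h]
  by_cases hc : PySem.Chars.strip s.toList = [] <;> simp [hc]

theorem stripNE_append (res : List String) (s : String) :
    (if PySem.Str.strip s ≠ "" then res ++ [PySem.Str.strip s] else res) =
      res ++ pvStripNE s.toList := by
  have h : (if PySem.Str.strip s ≠ "" then res ++ [PySem.Str.strip s] else res) =
      res ++ (if PySem.Str.strip s ≠ "" then [PySem.Str.strip s] else []) := by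
    split_ifs <;> simp
  rw [h, strip_str]

theorem push_ofList (cur : List Char) (c : Char) :
    (String.ofList cur).push c = String.ofList (cur ++ [c]) := by
  have : ((String.ofList cur).push c).toList = (String.ofList (cur ++ [c])).toList := by simp
  exact String.toList_inj.mp this

theorem A_core (cs : List Char) (res : List String) (cur : List Char) (d : Int) :
    pvFinishA (List.foldl pvStepA (res, String.ofList cur, d) cs) = res ++ pvCore cs cur d := by
  induction cs generalizing res cur d with
  | nil =>
    simp only [List.foldl_nil, pvFinishA, pvCore]
    simpa using stripNE_append res (String.ofList cur)
  | cons c cs ih =>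
    rw [List.foldl_cons]
    by_cases h1 : c = '('
    · rw [show pvStepA (res, String.ofList cur, d) c = (res, String.ofList (cur ++ [c]), d + 1) from
        by simp [pvStepA, h1, push_ofList], ih]
      simp [pvCore, h1]
    · by_cases h2 : c = ')'
      · rw [show pvStepA (res, String.ofList cur, d) c = (res, String.ofList (cur ++ [c]), d - 1) from
          by simp [pvStepA, h2, push_ofList], ih]
        simp [pvCore, h2]
      · by_cases h3 : c = '&' ∧ d = 0
        · obtain ⟨hc, hd⟩ := h3
          subst hc hd
          rw [show pvStepA (res, String.ofList cur, 0) '&' = (res ++ pvStripNE cur, "", 0) from by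
            have h := stripNE_append res (String.ofList cur)
            simp only [pvStepA]
            simp only [String.toList_ofList] at h
            simp [h]]
          rw [show ("" : String) = String.ofList [] from rfl, ih]
          simp [pvCore, List.append_assoc]
        · rw [show pvStepA (res, String.ofList cur, d) c = (res, String.ofList (cur ++ [c]), d) from
            by simp [pvStepA, h1, h2, h3, push_ofList], ih]
          simp [pvCore, h1, h2, h3]

theorem core_find (cs : List Char) (cur : List Char) (d : Int) :
    pvCore cs cur d =
      match pvFindAmp d cs with
      | none => pvStripNE (cur ++ cs)
      | some i => pvStripNE (cur ++ cs.take i) ++ pvCore (cs.drop (i + 1)) [] 0 := by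
  induction cs generalizing cur d with
  | nil => simp [pvCore, pvFindAmp]
  | cons c cs ih =>
    simp only [pvCore, pvFindAmp]
    split_ifs with h1 h2 h3
    · rw [ih (cur ++ [c]) (d + 1)]
      rcases hf : pvFindAmp (d + 1) cs with _ | j <;> simp [List.append_assoc]
    · rw [ih (cur ++ [c]) (d - 1)]
      rcases hf : pvFindAmp (d - 1) cs with _ | j <;> simp [List.append_assoc]
    · simp
    · rw [ih (cur ++ [c]) d]
      rcases hf : pvFindAmp d cs with _ | j <;> simp [List.append_assoc]

theorem core_peel (cs : List Char) (acc : List String) :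
    pvPeel acc cs = acc ++ pvCore cs [] 0 := by
  fun_induction pvPeel acc cs with
  | case1 acc cs hf hne =>
    rw [core_find cs [] 0, hf]
    simp [pvStripNE, hne]
  | case2 acc cs hf hne =>
    rw [core_find cs [] 0, hf]
    simp [pvStripNE, hne]
  | case3 acc cs i hf ih =>
    rw [core_find cs [] 0, hf]
    by_cases h : PySem.Chars.strip (cs.take i) = []
    · simp only [h, ne_eq, not_true_eq_false, dite_false] at ih
      simp only [h, ne_eq, not_true_eq_false, if_false]
      rw [ih]
      simp [pvStripNE, h]
    · simp [h] at ih
      simp only [h, ne_eq, not_false_eq_true, if_true]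
      rw [ih]
      simp [pvStripNE, h]

-- ===== VERDICT (by name: the statement is the Claim_ definition above) =====
theorem split_constraints_py_spec : Claim_equal_split_constraints_py := by
  intro s _
  unfold Spec_split_constraints_py split_constraints_py split_constraints_py_alt
  have h := A_core s.toList [] [] 0
  simp only [show String.ofList ([] : List Char) = "" from rfl, List.nil_append] at h
  rw [core_peel, h]
  simp
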